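-- pv_equiv track=rewrite | github.com/lushanjun1127/wallpaper | 03_modified.py | _mask_cmd
-- ===== SOURCE A (Python) =====
-- from typing import List, Optional, Tuple, Any, Set  # 类型注解支持
--
-- def _mask_cmd(cmd: List[str]) -> str:
--     """
--     在命令中屏蔽敏感信息
--
--     Args:
--         cmd: 命令部分列表
--
--     Returns:
--         屏蔽后的命令字符串
--     """
--     out: List[str] = []                              # 输出列表
--     skip = False                                     # 跳过标志
--     for part in cmd:
--         if skip:
--             out.append("******")                     # 用星号替换密码
--             skip = False
--             continue
--         # 检查是否为密码参数
--         if part.lower() in ("-password", "--password"):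
--             out.append(part)
--             skip = True
--         else:
--             out.append(part)
--     return " ".join(out)
-- ===== SOURCE B (Python) =====
-- from typing import List
--
--
-- def _mask_cmd(cmd: List[str]) -> str:
--     # Pass 1: index-driven scan collecting the positions to mask; a flag
--     # consumes its value (i += 2), so a masked value never acts as a flag.
--     masked: List[int] = []
--     i = 0
--     while i < len(cmd):
--         if cmd[i].lower() in ("-password", "--password"):
--             masked.append(i + 1)
--             i += 2
--         else:
--             i += 1
--     # Pass 2: render.
--     return " ".join("******" if j in masked else part for j, part in enumerate(cmd))
-- ===== Notes on version B (the rewrite author's own statement) =====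
-- stated objective: alternative
-- what changed: Replaces the interleaved skip-flag state machine with a two-pass build-index-table-then-render decomposition: a while loop that jumps i+=2 past each flag/value pair collects the positions to mask, then a separate enumerate pass renders the string.
import Mathlib
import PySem

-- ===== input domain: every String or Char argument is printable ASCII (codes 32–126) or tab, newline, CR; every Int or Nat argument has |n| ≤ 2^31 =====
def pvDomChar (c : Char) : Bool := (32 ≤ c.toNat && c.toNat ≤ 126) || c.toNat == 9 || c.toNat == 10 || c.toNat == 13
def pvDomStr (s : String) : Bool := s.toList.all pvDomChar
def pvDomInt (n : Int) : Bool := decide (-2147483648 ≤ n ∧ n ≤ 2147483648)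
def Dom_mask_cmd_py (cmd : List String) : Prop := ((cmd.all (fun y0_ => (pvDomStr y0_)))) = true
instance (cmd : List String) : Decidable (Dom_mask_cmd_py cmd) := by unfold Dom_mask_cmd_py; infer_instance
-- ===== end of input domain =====

-- B replaces A's interleaved skip-flag state machine by a two-pass decomposition
-- (collect positions to mask with an i+=2 jump loop, then render); same result, similar cost.

-- ===== PORT A =====
-- the for-loop over `cmd` with state (out, skip)
def maskGoA (l : List String) (out : List String) (skip : Bool) : List String :=
  match l with
  | [] => out
  | part :: rest =>
    if skip then
      maskGoA rest (out ++ ["******"]) false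
    else if PySem.Str.lower part = "-password" ∨ PySem.Str.lower part = "--password" then
      maskGoA rest (out ++ [part]) true
    else
      maskGoA rest (out ++ [part]) false

def mask_cmd_py (cmd : List String) : String :=
  PySem.Str.join " " (maskGoA cmd [] false)

-- ===== PORT B =====
-- the while loop `i = 0; while i < len(cmd): ...` collecting masked positions
def maskIdxB (cmd : List String) (i : Nat) (masked : List Int) : List Int :=
  if h : i < cmd.length then
    if PySem.Str.lower cmd[i] = "-password" ∨ PySem.Str.lower cmd[i] = "--password" then
      maskIdxB cmd (i + 2) (masked ++ [(i : Int) + 1])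
    else
      maskIdxB cmd (i + 1) masked
  else masked
termination_by cmd.length - i

def mask_cmd_py_alt (cmd : List String) : String :=
  let masked := maskIdxB cmd 0 []
  PySem.Str.join " "
    ((PySem.List.enumerate cmd).map (fun p => if p.1 ∈ masked then "******" else p.2))

-- ===== PRECONDITION & SPEC =====
def Spec_mask_cmd_py (cmd : List String) (out : String) : Prop := out = mask_cmd_py_alt cmd
instance (cmd : List String) (out : String) : Decidable (Spec_mask_cmd_py cmd out) := by unfold Spec_mask_cmd_py; infer_instance

-- ===== CLAIM (what is proved, stated in full; the proofs are below) =====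
def Claim_equal_mask_cmd_py : Prop := ∀ (cmd : List String), Dom_mask_cmd_py cmd → Spec_mask_cmd_py cmd (mask_cmd_py cmd)

-- ===== LEMMAS AND PROOFS =====

theorem maskGoA_nil (out : List String) (skip : Bool) : maskGoA [] out skip = out := rfl

theorem maskGoA_cons_skip (part : String) (rest out : List String) :
    maskGoA (part :: rest) out true = maskGoA rest (out ++ ["******"]) false := rfl

theorem maskGoA_cons_flag (part : String) (rest out : List String)
    (h : PySem.Str.lower part = "-password" ∨ PySem.Str.lower part = "--password") :
    maskGoA (part :: rest) out false = maskGoA rest (out ++ [part]) true := by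
  simp only [maskGoA]
  rw [if_neg (by simp), if_pos h]

theorem maskGoA_cons_other (part : String) (rest out : List String)
    (h : ¬ (PySem.Str.lower part = "-password" ∨ PySem.Str.lower part = "--password")) :
    maskGoA (part :: rest) out false = maskGoA rest (out ++ [part]) false := by
  simp only [maskGoA]
  rw [if_neg (by simp), if_neg h]

theorem maskGoA_out (l : List String) (out : List String) (skip : Bool) :
    maskGoA l out skip = out ++ maskGoA l [] skip := by
  induction l generalizing out skip with
  | nil => simp [maskGoA_nil]
  | cons part rest ih =>
    cases skip with
    | true =>
      rw [maskGoA_cons_skip, maskGoA_cons_skip, ih (out ++ ["******"]), ih ([] ++ ["******"])]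
      simp
    | false =>
      by_cases h : PySem.Str.lower part = "-password" ∨ PySem.Str.lower part = "--password"
      · rw [maskGoA_cons_flag _ _ _ h, maskGoA_cons_flag _ _ _ h,
          ih (out ++ [part]), ih ([] ++ [part])]
        simp
      · rw [maskGoA_cons_other _ _ _ h, maskGoA_cons_other _ _ _ h,
          ih (out ++ [part]), ih ([] ++ [part])]
        simp

theorem maskIdxB_stop (cmd : List String) (i : Nat) (masked : List Int)
    (h : ¬ i < cmd.length) : maskIdxB cmd i masked = masked := by
  rw [maskIdxB]
  simp [h]

theorem maskIdxB_step_flag (cmd : List String) (i : Nat) (masked : List Int)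
    (h : i < cmd.length)
    (hf : PySem.Str.lower cmd[i] = "-password" ∨ PySem.Str.lower cmd[i] = "--password") :
    maskIdxB cmd i masked = maskIdxB cmd (i + 2) (masked ++ [(i : Int) + 1]) := by
  rw [maskIdxB]
  simp [h, hf]

theorem maskIdxB_step_other (cmd : List String) (i : Nat) (masked : List Int)
    (h : i < cmd.length)
    (hf : ¬ (PySem.Str.lower cmd[i] = "-password" ∨ PySem.Str.lower cmd[i] = "--password")) :
    maskIdxB cmd i masked = maskIdxB cmd (i + 1) masked := by
  rw [maskIdxB]
  simp only [h, dif_pos]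
  rw [if_neg hf]

theorem maskIdxB_acc (cmd : List String) (k i : Nat) (hk : cmd.length - i ≤ k)
    (masked : List Int) :
    maskIdxB cmd i masked = masked ++ maskIdxB cmd i [] := by
  induction k generalizing i masked with
  | zero =>
    have h : ¬ i < cmd.length := by omega
    rw [maskIdxB_stop _ _ _ h, maskIdxB_stop _ _ _ h]
    simp
  | succ k ih =>
    by_cases h : i < cmd.length
    · by_cases hf : PySem.Str.lower cmd[i] = "-password" ∨ PySem.Str.lower cmd[i] = "--password"
      · rw [maskIdxB_step_flag _ _ _ h hf, maskIdxB_step_flag _ _ ([]) h hf,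
          ih (i + 2) (by omega), ih (i + 2) (by omega) ([] ++ [(i : Int) + 1])]
        simp
      · rw [maskIdxB_step_other _ _ _ h hf, maskIdxB_step_other _ _ ([]) h hf,
          ih (i + 1) (by omega), ih (i + 1) (by omega) []]
    · rw [maskIdxB_stop _ _ _ h, maskIdxB_stop _ _ _ h]
      simp

theorem maskIdxB_gt (cmd : List String) (k i : Nat) (hk : cmd.length - i ≤ k) :
    ∀ x ∈ maskIdxB cmd i [], (i : Int) < x := by
  induction k generalizing i with
  | zero =>
    have h : ¬ i < cmd.length := by omega
    rw [maskIdxB_stop _ _ _ h]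
    simp
  | succ k ih =>
    by_cases h : i < cmd.length
    · by_cases hf : PySem.Str.lower cmd[i] = "-password" ∨ PySem.Str.lower cmd[i] = "--password"
      · rw [maskIdxB_step_flag _ _ _ h hf, maskIdxB_acc cmd k (i + 2) (by omega)]
        intro x hx
        rcases List.mem_append.mp hx with hx | hx
        · simp only [List.nil_append, List.mem_singleton] at hx
          omega
        · have := ih (i + 2) (by omega) x hx
          omega
      · rw [maskIdxB_step_other _ _ _ h hf]
        intro x hx
        have := ih (i + 1) (by omega) x hx
        omega
    · rw [maskIdxB_stop _ _ _ h]
      simp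

-- the main invariant: from position i onward, A's remaining output equals B's rendering
theorem mask_main (cmd : List String) (k i : Nat) (hk : cmd.length - i ≤ k) :
    maskGoA (cmd.drop i) [] false =
      (PySem.List.enumerate (cmd.drop i) (i : Int)).map
        (fun p => if p.1 ∈ maskIdxB cmd i [] then "******" else p.2) := by
  induction k generalizing i with
  | zero =>
    rw [List.drop_eq_nil_of_le (by omega)]
    simp [maskGoA_nil, PySem.List.enumerate_nil]
  | succ k ih =>
    by_cases h : i < cmd.length
    · have hdrop : cmd.drop i = cmd[i] :: cmd.drop (i + 1) := List.drop_eq_getElem_cons h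
      by_cases hflag : PySem.Str.lower cmd[i] = "-password" ∨ PySem.Str.lower cmd[i] = "--password"
      · rw [maskIdxB_step_flag _ _ _ h hflag, maskIdxB_acc cmd k (i + 2) (by omega)]
        set M : List Int := maskIdxB cmd (i + 2) [] with hM
        have hMgt : ∀ x ∈ M, (i : Int) + 2 < x := maskIdxB_gt cmd k (i + 2) (by omega)
        have hiNot : ¬ ((i : Int) ∈ ([] ++ [(i : Int) + 1]) ++ M) := by
          simp only [List.nil_append, List.mem_append, List.mem_singleton]
          rintro (hx | hx)
          · omega
          · exact absurd (hMgt _ hx) (by omega)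
        by_cases h2 : i + 1 < cmd.length
        · have hdrop2 : cmd.drop (i + 1) = cmd[i + 1] :: cmd.drop (i + 2) :=
            List.drop_eq_getElem_cons h2
          rw [hdrop, hdrop2, maskGoA_cons_flag _ _ _ hflag, maskGoA_cons_skip, maskGoA_out,
            PySem.List.enumerate_cons, PySem.List.enumerate_cons, List.map_cons, List.map_cons]
          have hi1 : ((i : Int) + 1 ∈ ([] ++ [(i : Int) + 1]) ++ M) := by simp
          rw [if_neg hiNot, if_pos hi1]
          have htail :
              (PySem.List.enumerate (cmd.drop (i + 2)) ((i : Int) + 1 + 1)).map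
                (fun p => if p.1 ∈ ([] ++ [(i : Int) + 1]) ++ M then "******" else p.2) =
              (PySem.List.enumerate (cmd.drop (i + 2)) (((i + 2 : Nat) : Int))).map
                (fun p => if p.1 ∈ M then "******" else p.2) := by
            have harg : ((i : Int) + 1 + 1) = (((i + 2 : Nat) : Int)) := by push_cast; ring
            rw [harg]
            apply List.map_congr_left
            intro p hp
            obtain ⟨m, hm, rfl⟩ := (PySem.List.mem_enumerate_iff _ _ p).mp hp
            have hmem : ((((i + 2 : Nat) : Int)) + m ∈ ([] ++ [(i : Int) + 1]) ++ M)
                ↔ ((((i + 2 : Nat) : Int)) + m ∈ M) := by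
              simp only [List.nil_append, List.mem_append, List.mem_singleton]
              constructor
              · rintro (hx | hx)
                · exfalso
                  push_cast at hx
                  omega
                · exact hx
              · exact Or.inr
            simp only [hmem]
          rw [htail, ← ih (i + 2) (by omega)]
          simp
        · have hnil : cmd.drop (i + 1) = [] := List.drop_eq_nil_of_le (by omega)
          have hM2 : M = [] := by
            rw [hM, maskIdxB_stop _ _ _ (by omega)]
          rw [hdrop, hnil, maskGoA_cons_flag _ _ _ hflag, maskGoA_nil,
            PySem.List.enumerate_cons, PySem.List.enumerate_nil, List.map_cons, List.map_nil,
            if_neg hiNot]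
          simp
      · rw [maskIdxB_step_other _ _ _ h hflag, hdrop, maskGoA_cons_other _ _ _ hflag,
          maskGoA_out, PySem.List.enumerate_cons, List.map_cons]
        have hMgt : ∀ x ∈ maskIdxB cmd (i + 1) [], (i : Int) + 1 < x :=
          maskIdxB_gt cmd k (i + 1) (by omega)
        have hiNot : ¬ ((i : Int) ∈ maskIdxB cmd (i + 1) []) := fun hx =>
          absurd (hMgt _ hx) (by omega)
        rw [if_neg hiNot]
        have harg : ((i : Int) + 1) = (((i + 1 : Nat) : Int)) := by push_cast; ring
        rw [harg, ← ih (i + 1) (by omega)]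
        simp
    · rw [List.drop_eq_nil_of_le (by omega)]
      simp [maskGoA_nil, PySem.List.enumerate_nil]

-- ===== VERDICT (by name: the statement is the Claim_ definition above) =====
theorem mask_cmd_py_spec : Claim_equal_mask_cmd_py := by
  intro cmd _
  unfold Spec_mask_cmd_py mask_cmd_py mask_cmd_py_alt
  have h := mask_main cmd cmd.length 0 (by omega)
  simp only [List.drop_zero, Nat.cast_zero] at h
  rw [h]
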